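-- pv_equiv track=rewrite | github.com/from-import/myCumtWorks | PythonExperiment/Task1.3.py | generate_special_matrix
-- ===== SOURCE A (Python) =====
-- def generate_special_matrix(k):
--     if k % 2 == 0:
--         raise ValueError("k must be an odd number")
--
--     matrix = [[0] * k for _ in range(k)]
--     num = 1
--
--     for i in range(k):
--         if i % 2 == 0:
--             for j in range(k):
--                 matrix[i][j] = num
--                 num += 1
--         else:
--             for j in range(k - 1, -1, -1):
--                 matrix[i][j] = num
--                 num += 1
--
--     return matrix
-- ===== SOURCE B (Python) =====
-- def generate_special_matrix(k):
--     if k % 2 == 0: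
--         raise ValueError("k must be an odd number")
--
--     flat = range(1, k * k + 1)
--     chunks = [list(flat[s:s + k]) for s in range(0, k * k, k)]
--
--     out = []
--     while chunks:
--         out.append(chunks.pop(0))
--         if chunks:
--             out.append(chunks.pop(0)[::-1])
--     return out
-- ===== Notes on version B (the rewrite author's own statement) =====
-- stated objective: alternative
-- what changed: Instead of mutating a preallocated zero matrix under a running counter with parity-switched inner loops, B takes the flat sequence range(1, k*k+1) once, slices it into k chunks, and then a separate pass consumes the chunk list two rows at a time (append first as-is, append second reversed), with no per-row parity test and no counter.
import Mathlib
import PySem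

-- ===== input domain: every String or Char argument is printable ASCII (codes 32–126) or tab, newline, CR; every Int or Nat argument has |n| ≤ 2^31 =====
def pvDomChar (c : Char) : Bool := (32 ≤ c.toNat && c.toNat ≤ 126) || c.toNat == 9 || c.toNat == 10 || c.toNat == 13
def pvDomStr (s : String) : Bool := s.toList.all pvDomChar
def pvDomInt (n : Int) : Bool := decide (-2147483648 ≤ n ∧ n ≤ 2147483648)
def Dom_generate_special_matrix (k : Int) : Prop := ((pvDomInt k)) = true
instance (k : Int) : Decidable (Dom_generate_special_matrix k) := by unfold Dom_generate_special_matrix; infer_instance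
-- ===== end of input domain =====

-- B replaces the counter-threaded in-place fill with three stages: the flat list 1..k*k, slicing
-- it into k chunks, and a loop consuming the chunks two at a time, reversing every second one
-- (objective: alternative). Return-value equivalence on odd k (A raises ValueError on even k).

-- ===== PORT A =====
-- Literal port of A: allocate a k×k zero matrix, then fill it in place, threading the counter
-- `num` through the two inner loops (ascending on even rows, descending on odd rows).
def generate_special_matrix (k : Int) : List (List Int) :=
  if PySem.Int.mod k 2 = 0 then []  -- Python: raise ValueError("k must be an odd number"); excluded by Pre_
  else
    let matrix : List (List Int) :=
      (PySem.List.pyRange 0 k 1).map (fun _ => List.replicate k.toNat (0 : Int))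
    let st :=
      (PySem.List.pyRange 0 k 1).foldl (fun (st : List (List Int) × Int) i =>
        if PySem.Int.mod i 2 = 0 then
          (PySem.List.pyRange 0 k 1).foldl (fun st j =>
            (PySem.List.pySetD st.1 i (PySem.List.pySetD (PySem.List.pyGetD st.1 i []) j st.2),
             st.2 + 1)) st
        else
          (PySem.List.pyRange (k - 1) (-1) (-1)).foldl (fun st j =>
            (PySem.List.pySetD st.1 i (PySem.List.pySetD (PySem.List.pyGetD st.1 i []) j st.2),
             st.2 + 1)) st)
        (matrix, 1)
    st.1

-- ===== PORT B =====
-- The `while chunks:` loop of Source B: pop the first chunk and append it; if a chunk remains, pop it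
-- and append it reversed (Python's chunk[::-1] is List.reverse, cf. PySem.List.slice?_none_none_neg_one).
-- Ported as the structural recursion that consumes the chunk list two elements at a time,
-- accumulating `out` exactly as the Python loop does.
def pvSnakeLoop (chunks out : List (List Int)) : List (List Int) :=
  match chunks with
  | [] => out
  | a :: rest =>
    match rest with
    | [] => out ++ [a]
    | b :: rest2 => pvSnakeLoop rest2 (out ++ [a, b.reverse])

-- Literal port of B: the range object flat = range(1, k*k+1) is the sequence 1..k*k (pyRange);
-- slicing a range slices that sequence, so flat[s:s+k] is PySem.List.slice of it; then the pairing loop.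
def generate_special_matrix_alt (k : Int) : List (List Int) :=
  if PySem.Int.mod k 2 = 0 then []  -- Python: raise ValueError("k must be an odd number"); excluded by Pre_
  else
    -- flat = range(1, k*k+1) is a lazy range object; its sequence (pyRange) is only walked when a
    -- slice flat[s:s+k] is taken, so it is inlined into the chunk comprehension
    pvSnakeLoop ((PySem.List.pyRange 0 (k * k) k).map
      (fun s => PySem.List.slice (PySem.List.pyRange 1 (k * k + 1) 1) (some s) (some (s + k)))) []

-- ===== PRECONDITION & SPEC =====
-- A (and B) raise ValueError exactly on even k; Pre_ admits exactly the odd k.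
def Pre_generate_special_matrix (k : Int) : Prop := PySem.Int.mod k 2 ≠ 0
instance (k : Int) : Decidable (Pre_generate_special_matrix k) := by unfold Pre_generate_special_matrix; infer_instance
def pvWitness_generate_special_matrix : Int := 3

def Spec_generate_special_matrix (k : Int) (out : List (List Int)) : Prop := out = generate_special_matrix_alt k
instance (k : Int) (out : List (List Int)) : Decidable (Spec_generate_special_matrix k out) := by unfold Spec_generate_special_matrix; infer_instance

-- ===== CLAIM (what is proved, stated in full; the proofs are below) =====
def Claim_equal_generate_special_matrix : Prop := ∀ (k : Int), Dom_generate_special_matrix k → Pre_generate_special_matrix k → Spec_generate_special_matrix k (generate_special_matrix k)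

-- ===== LEMMAS AND PROOFS =====

-- reading / writing the (P.length)-th row of the matrix P ++ row :: R
theorem pv_getMid {α : Type} (P : List α) (row : α) (R : List α) (d : α) :
    PySem.List.pyGetD (P ++ row :: R) ((P.length : Int)) d = row := by
  simp [PySem.List.pyGetD_natCast, List.getD]

theorem pv_setMid {α : Type} (P : List α) (row v : α) (R : List α) :
    PySem.List.pySetD (P ++ row :: R) ((P.length : Int)) v = P ++ v :: R := by
  simp [PySem.List.pySetD_natCast]

theorem pv_take_set_succ {α : Type} (row : List α) (n : Nat) (v : α) (h : n < row.length) :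
    (row.set n v).take (n + 1) = row.take n ++ [v] := by
  induction row generalizing n with
  | nil => simp at h
  | cons x xs ih =>
    cases n with
    | zero => simp
    | succ m => simp [List.set, ih m (by simpa using h)]

theorem pv_drop_set {α : Type} (row : List α) (n : Nat) (v : α) (h : n < row.length) :
    (row.set n v).drop n = v :: row.drop (n + 1) := by
  induction row generalizing n with
  | nil => simp at h
  | cons x xs ih =>
    cases n with
    | zero => simp
    | succ m => simpa [List.set] using ih m (by simpa using h)

theorem pv_pyRange_neg_one_snoc (a b : Int) (h : b ≤ a) :
    PySem.List.pyRange a (b - 1) (-1) = PySem.List.pyRange a b (-1) ++ [b] := by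
  rw [PySem.List.pyRange_neg_one_eq_reverse, PySem.List.pyRange_neg_one_eq_reverse,
    show b - 1 + 1 = b by ring, PySem.List.pyRange_one_cons (by omega)]
  simp

-- the ascending inner loop fills positions a, a+1, …, K-1 with num, num+1, …
theorem pv_inner_asc (P R : List (List Int)) (K : Nat) (i : Int)
    (hi : i = (P.length : Int)) (d : Nat) :
    ∀ (a : Nat) (row : List Int) (num : Int), a + d = K → row.length = K →
    (PySem.List.pyRange (a : Int) (K : Int) 1).foldl (fun st j =>
        (PySem.List.pySetD st.1 i
          (PySem.List.pySetD (PySem.List.pyGetD st.1 i []) j st.2),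
         st.2 + 1)) (P ++ row :: R, num)
      = (P ++ (row.take a ++ PySem.List.pyRange num (num + d) 1) :: R, num + d) := by
  subst hi
  induction d with
  | zero =>
    intro a row num ha hrow
    rw [PySem.List.pyRange_one_eq_nil (by omega), PySem.List.pyRange_one_eq_nil (by omega),
      List.take_of_length_le (by omega)]
    simp
  | succ d ih =>
    intro a row num ha hrow
    rw [PySem.List.pyRange_one_cons (by exact_mod_cast by omega)]
    simp only [List.foldl_cons, pv_getMid, pv_setMid]
    have : ((a : Int)) = ((a : Nat) : Int) := rfl
    rw [show ((a : Int) + 1) = (((a + 1 : Nat)) : Int) by push_cast; ring]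
    rw [ih (a + 1) (PySem.List.pySetD row ((a : Nat) : Int) num) (num + 1) (by omega)
      (by simp [PySem.List.pySetD_natCast, hrow])]
    rw [PySem.List.pySetD_natCast, pv_take_set_succ row a num (by omega)]
    rw [PySem.List.pyRange_one_cons (a := num) (by omega)]
    simp only [Prod.mk.injEq, List.append_assoc, List.singleton_append]
    refine ⟨?_, by push_cast; ring⟩
    rw [show num + ((d + 1 : Nat) : Int) = num + 1 + (d : Int) by push_cast; ring]

-- the full ascending pass over a length-K row
theorem pv_inner_asc0 (P R : List (List Int)) (K : Nat) (i : Int)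
    (hi : i = (P.length : Int)) (row : List Int) (num : Int) (hrow : row.length = K) :
    (PySem.List.pyRange 0 (K : Int) 1).foldl (fun st j =>
        (PySem.List.pySetD st.1 i
          (PySem.List.pySetD (PySem.List.pyGetD st.1 i []) j st.2),
         st.2 + 1)) (P ++ row :: R, num)
      = (P ++ PySem.List.pyRange num (num + K) 1 :: R, num + K) := by
  have h := pv_inner_asc P R K i hi K 0 row num (by omega) hrow
  simpa using h

-- the descending inner loop fills positions d-1, d-2, …, 0 with num, num+1, …
theorem pv_inner_desc (P R : List (List Int)) (K : Nat) (i : Int)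
    (hi : i = (P.length : Int)) :
    ∀ (d : Nat) (row : List Int) (num : Int), d ≤ K → row.length = K →
    (PySem.List.pyRange ((d : Int) - 1) (-1) (-1)).foldl (fun st j =>
        (PySem.List.pySetD st.1 i
          (PySem.List.pySetD (PySem.List.pyGetD st.1 i []) j st.2),
         st.2 + 1)) (P ++ row :: R, num)
      = (P ++ (PySem.List.pyRange (num + d - 1) (num - 1) (-1) ++ row.drop d) :: R, num + d) := by
  subst hi
  intro d
  induction d with
  | zero =>
    intro row num _ hrow
    rw [PySem.List.pyRange_neg_one_eq_nil (by omega), PySem.List.pyRange_neg_one_eq_nil (by omega)]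
    simp
  | succ d ih =>
    intro row num hd hrow
    rw [show ((d + 1 : Nat) : Int) - 1 = (d : Int) by push_cast; ring,
      PySem.List.pyRange_neg_one_cons (by omega)]
    simp only [List.foldl_cons, pv_getMid, pv_setMid]
    rw [show ((d : Int) - 1) = (((d : Nat)) : Int) - 1 by rfl]
    rw [ih (PySem.List.pySetD row ((d : Nat) : Int) num) (num + 1) (by omega)
      (by simp [PySem.List.pySetD_natCast, hrow])]
    rw [PySem.List.pySetD_natCast, pv_drop_set row d num (by omega)]
    simp only [Prod.mk.injEq]
    constructor
    · rw [show num + ((d + 1 : Nat) : Int) - 1 = num + (d : Int) by push_cast; ring,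
        pv_pyRange_neg_one_snoc (num + (d : Int)) num (by omega),
        show num + 1 - 1 = num by ring, show num + 1 + (d : Int) = num + (d : Int) + 1 by ring]
      simp
    · push_cast; ring

-- the outer loop of A: after n rows, the first n rows are the closed-form snake rows, num = n*K+1
theorem pv_outer (K : Nat) : ∀ (n : Nat), n ≤ K →
    (PySem.List.pyRange 0 (n : Int) 1).foldl (fun (st : List (List Int) × Int) i =>
        if PySem.Int.mod i 2 = 0 then
          (PySem.List.pyRange 0 (K : Int) 1).foldl (fun st j =>
            (PySem.List.pySetD st.1 i (PySem.List.pySetD (PySem.List.pyGetD st.1 i []) j st.2),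
             st.2 + 1)) st
        else
          (PySem.List.pyRange ((K : Int) - 1) (-1) (-1)).foldl (fun st j =>
            (PySem.List.pySetD st.1 i (PySem.List.pySetD (PySem.List.pyGetD st.1 i []) j st.2),
             st.2 + 1)) st)
      (List.replicate K (List.replicate K (0 : Int)), 1)
    = ((PySem.List.pyRange 0 (n : Int) 1).map (fun i =>
          if PySem.Int.mod i 2 = 0 then PySem.List.pyRange (i * K + 1) (i * K + K + 1) 1
          else PySem.List.pyRange (i * K + K) (i * K) (-1))
        ++ List.replicate (K - n) (List.replicate K (0 : Int)), (n : Int) * K + 1) := by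
  intro n
  induction n with
  | zero => intro _; simp
  | succ n ih =>
    intro hn
    rw [show ((n + 1 : Nat) : Int) = (n : Int) + 1 by push_cast; ring,
      PySem.List.pyRange_one_succ_right (by omega), List.foldl_append, List.map_append,
      ih (by omega)]
    simp only [List.foldl_cons, List.foldl_nil, List.map_cons, List.map_nil]
    have hP : ((n : Int)) = (((PySem.List.pyRange 0 (n : Int) 1).map (fun i =>
          if PySem.Int.mod i 2 = 0 then PySem.List.pyRange (i * K + 1) (i * K + K + 1) 1
          else PySem.List.pyRange (i * K + K) (i * K) (-1))).length : Int) := by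
      simp [PySem.List.length_pyRange_one]
    have hrep : List.replicate (K - n) (List.replicate K (0 : Int))
        = List.replicate K (0 : Int) :: List.replicate (K - (n + 1)) (List.replicate K (0 : Int)) := by
      rw [show K - n = (K - (n + 1)) + 1 by omega, List.replicate_succ]
    rw [hrep]
    by_cases hpar : n % 2 = 0
    · rw [if_pos (by rw [PySem.Int.mod_eq_zero_iff_dvd]; omega)]
      rw [pv_inner_asc0 _ _ K ((n : Int)) hP _ _ (by simp)]
      rw [if_pos (by rw [PySem.Int.mod_eq_zero_iff_dvd]; omega)]
      simp only [Prod.mk.injEq]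
      constructor
      · rw [show (n : Int) * K + 1 + (K : Int) = (n : Int) * K + K + 1 by ring]
        simp
      · ring
    · rw [if_neg (by rw [PySem.Int.mod_eq_zero_iff_dvd]; omega)]
      rw [pv_inner_desc _ _ K ((n : Int)) hP K _ _ (by omega) (by simp)]
      rw [if_neg (by rw [PySem.Int.mod_eq_zero_iff_dvd]; omega)]
      simp only [Prod.mk.injEq]
      constructor
      · rw [show (n : Int) * K + 1 + (K : Int) - 1 = (n : Int) * K + K by ring,
          show (n : Int) * K + 1 - 1 = (n : Int) * K by ring]
        simp
      · ring

-- B-side: the pairing loop's accumulator factors out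
theorem pv_snakeLoop_append : ∀ (n : Nat) (l : List (List Int)), l.length ≤ n →
    ∀ out, pvSnakeLoop l out = out ++ pvSnakeLoop l [] := by
  intro n
  induction n with
  | zero =>
    intro l hl out
    have hnil : l = [] := List.length_eq_zero_iff.mp (by omega)
    subst hnil
    simp [pvSnakeLoop]
  | succ n ih =>
    intro l hl out
    match l with
    | [] => simp [pvSnakeLoop]
    | [a] => simp [pvSnakeLoop]
    | a :: b :: rest =>
      show pvSnakeLoop rest (out ++ [a, b.reverse]) = out ++ pvSnakeLoop rest ([] ++ [a, b.reverse])
      rw [ih rest (by simp at hl; omega) (out ++ [a, b.reverse]),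
        ih rest (by simp at hl; omega) ([] ++ [a, b.reverse])]
      simp

-- B-side: on rows indexed from an even start, the pairing loop reverses exactly the odd-indexed rows
theorem pv_snake_go : ∀ (n : Nat), ∀ (m s : Nat), m ≤ n → s % 2 = 0 → ∀ (f : Nat → List Int),
    pvSnakeLoop ((List.range' s m).map f) []
      = (List.range' s m).map (fun i => if i % 2 = 0 then f i else (f i).reverse) := by
  intro n
  induction n with
  | zero =>
    intro m s hm _ f
    rw [show m = 0 by omega]
    simp [pvSnakeLoop]
  | succ n ih =>
    intro m s hm hs f
    match m with
    | 0 => simp [pvSnakeLoop]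
    | 1 => simp [List.range', pvSnakeLoop, hs]
    | (m + 2) =>
      rw [List.range'_succ, List.range'_succ]
      simp only [List.map_cons]
      show pvSnakeLoop ((List.range' (s + 1 + 1) m).map f) ([] ++ [f s, (f (s + 1)).reverse]) = _
      rw [pv_snakeLoop_append ((List.range' (s + 1 + 1) m).map f).length _ le_rfl,
        ih m (s + 1 + 1) (by omega) (by omega) f]
      simp [hs, Nat.succ_mod_two_eq_one_iff.mpr hs]

-- B-side: the s-th chunk of the flat list 1..K² is the ascending row starting at s+1
theorem pv_chunk (K j : Nat) (hj : j < K) :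
    PySem.List.slice (PySem.List.pyRange 1 ((K : Int) * K + 1) 1)
        (some ((K : Int) * j)) (some ((K : Int) * j + K))
      = PySem.List.pyRange ((K : Int) * j + 1) ((K : Int) * j + K + 1) 1 := by
  have hle : K * j + K ≤ K * K := by nlinarith
  zify at hle
  rw [show (K : Int) * j = ((K * j : Nat) : Int) by push_cast; ring]
  rw [PySem.List.slice_natCast_add]
  rw [PySem.List.pyRange_one_append 1 (((K * j : Nat) : Int) + 1) ((K : Int) * K + 1)
      (by omega) (by push_cast; omega),
    PySem.List.pyRange_one_append (((K * j : Nat) : Int) + 1) (((K * j : Nat) : Int) + K + 1)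
      ((K : Int) * K + 1) (by omega) (by push_cast; omega)]
  rw [List.drop_left' (by rw [PySem.List.length_pyRange_one]; omega),
    List.take_left' (by rw [PySem.List.length_pyRange_one]; omega)]

-- ===== VERDICT (by name: the statement is the Claim_ definition above) =====
theorem generate_special_matrix_spec : Claim_equal_generate_special_matrix := by
  intro k _ hpre
  unfold Spec_generate_special_matrix generate_special_matrix generate_special_matrix_alt
  rw [if_neg hpre, if_neg hpre]
  by_cases hk : k ≤ 0
  · -- k odd and ≤ 0, hence k < 0: A's outer range and B's chunk range are both empty
    have hk0 : k ≠ 0 := by rintro rfl; exact hpre (by decide)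
    rw [PySem.List.pyRange_one_eq_nil (by omega)]
    rw [show PySem.List.pyRange 0 (k * k) k = [] by
      simp [PySem.List.pyRange, show ¬ 0 < k by omega, show ¬ k * k < 0 by nlinarith]]
    simp [pvSnakeLoop]
  · obtain ⟨K, hK⟩ : ∃ K : Nat, k = (K : Int) := ⟨k.toNat, by omega⟩
    subst hK
    have hKpos : 0 < K := by omega
    dsimp only
    -- A's side: the in-place fill equals the closed-form snake rows
    rw [show ((PySem.List.pyRange 0 (K : Int) 1).map (fun _ => List.replicate ((K : Int)).toNat (0 : Int)))
        = List.replicate K (List.replicate K (0 : Int)) by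
      simp [PySem.List.pyRange_one, Function.comp_def, List.map_const']]
    rw [pv_outer K K le_rfl]
    simp only [Nat.sub_self, List.replicate_zero, List.append_nil]
    -- B's side: chunk count is K …
    rw [PySem.List.pyRange_of_pos 0 ((K : Int) * K) (show (0 : Int) < K by exact_mod_cast hKpos)]
    rw [if_pos (by nlinarith [Int.natCast_pos.mpr hKpos]),
      show ((K : Int) * K - 0 + K - 1) = ((K : Int) - 1) + K * (K : Int) by ring,
      Int.add_mul_ediv_left _ _ (by omega : (K : Int) ≠ 0),
      Int.ediv_eq_zero_of_lt (by omega) (by omega),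
      show ((0 : Int) + K).toNat = K by omega]
    -- the pairing loop turns the chunks into the snake rows
    rw [List.map_map, List.range_eq_range', pv_snake_go K K 0 le_rfl (by omega)]
    -- both sides are now maps over 0..K-1; compare row by row
    rw [PySem.List.pyRange_one, List.map_map, show ((K : Int) - 0).toNat = K by omega,
      List.range_eq_range']
    refine List.map_congr_left (fun j hj => ?_)
    have hjK : j < K := by simpa using (List.mem_range'_1.mp hj).2
    simp only [Function.comp_apply, zero_add]
    by_cases hp : j % 2 = 0
    · rw [if_pos (by rw [PySem.Int.mod_eq_zero_iff_dvd]; omega), if_pos hp,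
        pv_chunk K j hjK, show (j : Int) * K = (K : Int) * j by ring]
    · rw [if_neg (by rw [PySem.Int.mod_eq_zero_iff_dvd]; omega), if_neg hp,
        pv_chunk K j hjK,
        show (j : Int) * K + K = (K : Int) * j + K by ring,
        show (j : Int) * K = (K : Int) * j by ring,
        PySem.List.pyRange_neg_one_eq_reverse,
        show (K : Int) * j + 1 = (K : Int) * ↑j + 1 by ring,
        show (K : Int) * j + K + 1 = (K : Int) * ↑j + K + 1 by ring]
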